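-- pv_equiv track=rewrite | github.com/albyr05/esami | circuiti_combinatori/main.py | get_number_of_gates
-- ===== SOURCE A (Python) =====
-- def get_number_of_gates(safe):
--     d = dict()
--     for line in safe:
--         data = line.strip().split()
--         gate_type, input_net = data[0], len(data[3:])
--         if gate_type not in d:
--             d[gate_type] = {}
--         if input_net not in d[gate_type]:
--             d[gate_type][input_net] = 1
--         else:
--             d[gate_type][input_net] += 1
--     return d
-- ===== SOURCE B (Python) =====
-- def _uniq(xs):
--     seen = set()
--     out = []
--     for x in xs:
--         if x not in seen:
--             seen.add(x)
--             out.append(x)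
--     return out
--
--
-- def get_number_of_gates(safe):
--     # phase 1: group the lines' input-net arities by gate type (no counting yet)
--     groups = {}
--     for line in safe:
--         data = line.strip().split()
--         groups.setdefault(data[0], []).append(len(data[3:]))
--     # phase 2: per gate type, count each distinct arity by scanning its own group
--     return {g: {n: nets.count(n) for n in _uniq(nets)}
--             for g, nets in groups.items()}
-- ===== Notes on version B (the rewrite author's own statement) =====
-- stated objective: alternative
-- what changed: A builds the nested count dict incrementally in a single pass; B works in two staged phases: it first groups each line's input-net arity into a per-gate-type list, then for each group produces the counts by deduplicating the group and scanning it with list.count.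
import Mathlib
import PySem

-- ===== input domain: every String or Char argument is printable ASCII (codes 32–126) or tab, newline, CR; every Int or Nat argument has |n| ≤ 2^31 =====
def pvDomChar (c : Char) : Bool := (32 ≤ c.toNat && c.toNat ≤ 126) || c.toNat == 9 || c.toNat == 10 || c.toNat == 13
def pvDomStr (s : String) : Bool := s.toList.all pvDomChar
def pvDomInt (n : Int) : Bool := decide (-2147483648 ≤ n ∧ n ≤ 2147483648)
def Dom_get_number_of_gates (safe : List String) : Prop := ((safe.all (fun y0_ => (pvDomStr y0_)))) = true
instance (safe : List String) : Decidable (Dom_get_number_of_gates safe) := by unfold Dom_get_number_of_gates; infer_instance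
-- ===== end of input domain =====

-- B replaces A's incremental nested-dict loop by a two-phase group-and-count: phase 1 groups the lines' arities by gate type, phase 2 counts each group's distinct arities by scanning that group; alternative decomposition.

-- ===== PORT A =====
-- one iteration of A's 'for line in safe' loop
def gnog_step (d : PySem.Dict String (PySem.Dict Int Int)) (line : String) :
    PySem.Dict String (PySem.Dict Int Int) :=
  let data := PySem.Str.split₀ (PySem.Str.strip line)
  let gate_type := PySem.List.pyGetD data 0 ""          -- data[0]; total under Pre_
  let input_net : Int := PySem.List.len (PySem.List.slice data (some 3) none)  -- len(data[3:])
  let d := if d.contains gate_type then d else d.insert gate_type PySem.Dict.empty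
  let inner := d.getD gate_type PySem.Dict.empty
  if inner.contains input_net then
    d.insert gate_type (inner.insert input_net (inner.getD input_net 0 + 1))
  else
    d.insert gate_type (inner.insert input_net 1)

def get_number_of_gates (safe : List String) : List (String × List (Int × Int)) :=
  ((safe.foldl gnog_step PySem.Dict.empty).items).map (fun p => (p.1, p.2.items))

-- ===== PORT B =====
-- the key B computes per line: (data[0], len(data[3:]))
def gnog_key (line : String) : String × Int :=
  let data := PySem.Str.split₀ (PySem.Str.strip line)
  (PySem.List.pyGetD data 0 "", PySem.List.len (PySem.List.slice data (some 3) none))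

-- phase 1 step: groups.setdefault(data[0], []).append(len(data[3:]))
def gnog_group_step (d : PySem.Dict String (List Int)) (line : String) :
    PySem.Dict String (List Int) :=
  d.modify (gnog_key line).1 [] (fun nets => nets ++ [(gnog_key line).2])

-- Source B's _uniq (set-based first-occurrence dedup) is PySem.Set.ofList
def get_number_of_gates_alt (safe : List String) : List (String × List (Int × Int)) :=
  ((safe.foldl gnog_group_step PySem.Dict.empty).items).map (fun p =>
    (p.1, (PySem.Set.ofList p.2).map (fun n => (n, (p.2.count n : Int)))))

-- ===== PRECONDITION & SPEC =====
-- Pre_ excludes inputs containing a line that is empty or all whitespace: there data[0] raises IndexError in A (and in B alike).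
def Pre_get_number_of_gates (safe : List String) : Prop :=
  ∀ line ∈ safe, PySem.Str.split₀ (PySem.Str.strip line) ≠ []
instance (safe : List String) : Decidable (Pre_get_number_of_gates safe) := by
  unfold Pre_get_number_of_gates; infer_instance
def pvWitness_get_number_of_gates : List String := ["nand g1 n1 n2 n3", "and g2 n1 n2", "nand g3 n4 n5 n6"]

def Spec_get_number_of_gates (safe : List String) (out : List (String × List (Int × Int))) : Prop := out = get_number_of_gates_alt safe
instance (safe : List String) (out : List (String × List (Int × Int))) : Decidable (Spec_get_number_of_gates safe out) := by unfold Spec_get_number_of_gates; infer_instance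

-- ===== CLAIM (what is proved, stated in full; the proofs are below) =====
def Claim_equal_get_number_of_gates : Prop := ∀ (safe : List String), Dom_get_number_of_gates safe → Pre_get_number_of_gates safe → Spec_get_number_of_gates safe (get_number_of_gates safe)

-- ===== LEMMAS AND PROOFS =====

-- A's loop step as a function of the key only, in Dict.modify form
def gnogStepK (d : PySem.Dict String (PySem.Dict Int Int)) (k : String × Int) :
    PySem.Dict String (PySem.Dict Int Int) :=
  d.modify k.1 PySem.Dict.empty (fun inner => inner.insert k.2 (inner.getD k.2 0 + 1))

theorem modify_eq_insert_getD {κ ν : Type} [BEq κ] [LawfulBEq κ] (d : PySem.Dict κ ν)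
    (k : κ) (d0 : ν) (f : ν → ν) : d.modify k d0 f = d.insert k (f (d.getD k d0)) := by
  simp [PySem.Dict.modify, PySem.Dict.insert, PySem.Dict.getD]

theorem gnog_step_eq (d : PySem.Dict String (PySem.Dict Int Int)) (line : String) :
    gnog_step d line = gnogStepK d (gnog_key line) := by
  simp only [gnog_step, gnogStepK, gnog_key]
  rw [modify_eq_insert_getD]
  set data := PySem.Str.split₀ (PySem.Str.strip line) with hd
  set g := PySem.List.pyGetD data 0 "" with hgd
  set n := PySem.List.len (PySem.List.slice data (some 3) none) with hnd
  by_cases hg : d.contains g = true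
  · simp only [hg, if_true]
    by_cases hn : (d.getD g PySem.Dict.empty).contains n = true
    · simp only [hn, if_true]
    · simp only [Bool.not_eq_true] at hn
      simp only [hn, Bool.false_eq_true, if_false,
        PySem.Dict.getD_of_not_contains _ _ hn, zero_add]
  · simp only [Bool.not_eq_true] at hg
    simp only [hg, Bool.false_eq_true, if_false, PySem.Dict.getD_insert_self,
      PySem.Dict.contains_empty, PySem.Dict.insert_insert_self,
      PySem.Dict.getD_of_not_contains _ _ hg, PySem.Dict.getD_empty, zero_add]

-- characterisation of A's fold: outer keys
theorem A_keys (ps : List (String × Int)) :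
    (ps.foldl gnogStepK PySem.Dict.empty).keys = PySem.Set.ofList (ps.map Prod.fst) := by
  calc (ps.foldl gnogStepK PySem.Dict.empty).keys
      = (ps.foldl (fun d k => d.modify k.1 PySem.Dict.empty
          ((fun (_ : PySem.Dict String (PySem.Dict Int Int)) (k : String × Int)
            (inner : PySem.Dict Int Int) => inner.insert k.2 (inner.getD k.2 0 + 1)) d k))
          PySem.Dict.empty).keys := by rfl
    _ = PySem.Set.update (PySem.Dict.empty : PySem.Dict String (PySem.Dict Int Int)).keys
          (ps.map Prod.fst) := PySem.Dict.keys_foldl_modify_key ps Prod.fst PySem.Dict.empty _ _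
    _ = PySem.Set.ofList (ps.map Prod.fst) := by
          rw [PySem.Dict.keys_empty, PySem.Set.update_nil_left]

-- characterisation of A's fold: inner keys for a given gate type
theorem A_inner_keys (ps : List (String × Int)) (g : String) :
    ((ps.foldl gnogStepK PySem.Dict.empty).getD g PySem.Dict.empty).keys
      = PySem.Set.ofList ((ps.filter (fun p => p.1 == g)).map Prod.snd) := by
  induction ps using List.reverseRecOn with
  | nil => simp [PySem.Dict.getD_empty, PySem.Dict.keys_empty, PySem.Set.ofList_nil]
  | append_singleton xs x ih =>
    obtain ⟨xg, xn⟩ := x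
    rw [List.foldl_append, List.foldl_cons, List.foldl_nil]
    show ((((xs.foldl gnogStepK PySem.Dict.empty).modify xg PySem.Dict.empty
      (fun inner => inner.insert xn (inner.getD xn 0 + 1))).getD g PySem.Dict.empty)).keys = _
    rw [PySem.Dict.getD_modify, List.filter_append]
    by_cases hg : g = xg
    · subst hg
      rw [if_pos rfl]
      have hf : List.filter (fun p => p.1 == g) [(g, xn)] = [(g, xn)] := by
        simp [List.filter]
      rw [hf, List.map_append, List.map_cons, List.map_nil,
        PySem.Set.ofList_append_singleton, ← ih]
      by_cases hn : ((xs.foldl gnogStepK PySem.Dict.empty).getD g PySem.Dict.empty).contains xn = true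
      · rw [PySem.Dict.keys_insert_of_contains _ _ hn,
          PySem.Set.add_of_mem ((PySem.Dict.contains_iff_mem_keys _ _).mp hn)]
      · have hn' : ((xs.foldl gnogStepK PySem.Dict.empty).getD g PySem.Dict.empty).contains xn = false := by
          simpa using hn
        rw [PySem.Dict.keys_insert_of_not_contains _ _ hn',
          PySem.Set.add_of_not_mem (fun hm => hn ((PySem.Dict.contains_iff_mem_keys _ _).mpr hm))]
    · rw [if_neg hg]
      have hgx : ¬ xg = g := fun h => hg h.symm
      have hf : List.filter (fun p => p.1 == g) [(xg, xn)] = [] := by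
        simp [List.filter, beq_eq_false_iff_ne.mpr hgx]
      rw [hf, List.append_nil]
      exact ih

-- characterisation of A's fold: each count is a list.count of the key list
theorem A_inner_getD (ps : List (String × Int)) (g : String) (n : Int) :
    (((ps.foldl gnogStepK PySem.Dict.empty).getD g PySem.Dict.empty).getD n 0)
      = (ps.count (g, n) : Int) := by
  induction ps using List.reverseRecOn with
  | nil => simp [PySem.Dict.getD_empty]
  | append_singleton xs x ih =>
    obtain ⟨xg, xn⟩ := x
    rw [List.foldl_append, List.foldl_cons, List.foldl_nil]
    show ((((xs.foldl gnogStepK PySem.Dict.empty).modify xg PySem.Dict.empty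
      (fun inner => inner.insert xn (inner.getD xn 0 + 1))).getD g PySem.Dict.empty)).getD n 0 = _
    rw [PySem.Dict.getD_modify, List.count_append, List.count_singleton]
    by_cases hg : g = xg
    · subst hg
      rw [if_pos rfl, PySem.Dict.getD_insert]
      by_cases hn : n = xn
      · subst hn
        have hx : (((g, n) : String × Int) == (g, n)) = true := by simp
        rw [if_pos rfl, ih, hx, if_pos rfl]
        push_cast; ring
      · have hx : (((g, xn) : String × Int) == (g, n)) = false := by
          simp [Prod.ext_iff]
          exact fun h => absurd h.symm hn
        rw [if_neg hn, ih, hx]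
        simp
    · rw [if_neg hg]
      have hgx : ¬ xg = g := fun h => hg h.symm
      have hx : (((xg, xn) : String × Int) == (g, n)) = false := by
        simp [Prod.ext_iff, hgx]
      rw [ih, hx]
      simp

-- B's group of gate type g holds exactly the arities of g's lines, and counting inside it equals counting the pair in the flat key list
theorem count_snd_filter (ps : List (String × Int)) (g : String) (n : Int) :
    ((ps.filter (fun p => p.1 == g)).map Prod.snd).count n = ps.count (g, n) := by
  induction ps with
  | nil => rfl
  | cons x xs ih =>
    obtain ⟨xg, xn⟩ := x
    by_cases hg : xg = g
    · subst hg
      by_cases hn : xn = n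
      · subst hn; simp [ih]
      · simp [ih, Prod.ext_iff, hn]
    · simp [ih, Prod.ext_iff, hg, beq_eq_false_iff_ne.mpr hg]

-- B's phase-1 fold over the parsed keys
theorem B_groups_keys (ps : List (String × Int)) :
    (ps.foldl (fun d (p : String × Int) => d.modify p.1 [] (fun nets => nets ++ [p.2]))
      (PySem.Dict.empty : PySem.Dict String (List Int))).keys
      = PySem.Set.ofList (ps.map Prod.fst) := by
  calc _ = PySem.Set.update (PySem.Dict.empty : PySem.Dict String (List Int)).keys
          (ps.map Prod.fst) := PySem.Dict.keys_foldl_modify_key ps Prod.fst ([] : List Int) _ _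
    _ = PySem.Set.ofList (ps.map Prod.fst) := by
          rw [PySem.Dict.keys_empty, PySem.Set.update_nil_left]

-- ===== VERDICT (by name: the statement is the Claim_ definition above) =====
theorem get_number_of_gates_spec : Claim_equal_get_number_of_gates := by
  intro safe _ _
  unfold Spec_get_number_of_gates get_number_of_gates get_number_of_gates_alt
  rw [show safe.foldl gnog_step PySem.Dict.empty
        = (safe.map gnog_key).foldl gnogStepK PySem.Dict.empty by
      rw [List.foldl_map]
      exact PySem.List.foldl_congr_mem _ _ _ _ (fun d line _ => gnog_step_eq d line)]
  rw [show safe.foldl gnog_group_step PySem.Dict.empty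
        = (safe.map gnog_key).foldl
            (fun d (p : String × Int) => d.modify p.1 [] (fun nets => nets ++ [p.2]))
            PySem.Dict.empty by
      rw [List.foldl_map]
      rfl]
  set ps := safe.map gnog_key with hps
  have ndA : (ps.foldl gnogStepK PySem.Dict.empty).keys.Nodup := by
    rw [A_keys]; exact PySem.Set.nodup_ofList _
  have ndB : ((ps.foldl (fun d (p : String × Int) => d.modify p.1 [] (fun nets => nets ++ [p.2]))
      (PySem.Dict.empty : PySem.Dict String (List Int)))).keys.Nodup := by
    rw [B_groups_keys]; exact PySem.Set.nodup_ofList _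
  rw [PySem.Dict.items_eq_map_keys _ ndA PySem.Dict.empty, A_keys, List.map_map,
    PySem.Dict.items_eq_map_keys _ ndB ([] : List Int), B_groups_keys, List.map_map, List.map_map]
  apply List.map_congr_left
  intro g _
  simp only [Function.comp]
  refine congrArg (Prod.mk g) ?_
  have hgrp : ((ps.foldl (fun d (p : String × Int) => d.modify p.1 [] (fun nets => nets ++ [p.2]))
      (PySem.Dict.empty : PySem.Dict String (List Int)))).getD g []
      = (ps.filter (fun p => p.1 == g)).map Prod.snd := by
    rw [PySem.Dict.getD_foldl_modify_append, PySem.Dict.getD_empty, List.nil_append]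
  rw [hgrp]
  have ndiA : ((ps.foldl gnogStepK PySem.Dict.empty).getD g PySem.Dict.empty).keys.Nodup := by
    rw [A_inner_keys]; exact PySem.Set.nodup_ofList _
  rw [PySem.Dict.items_eq_map_keys _ ndiA (0 : Int), A_inner_keys]
  apply List.map_congr_left
  intro n _
  rw [A_inner_getD, count_snd_filter]
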